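-- pv_equiv track=rewrite | github.com/bisq-network/bisq-website | .dao/utilities/cycle-overview-data/fetch.py | getCycleBlocks
-- ===== SOURCE A (Python) =====
-- def getCycleBlocks( cycle ):
--
--     cycleStart = 571747 - 1 # first block was 571747, but first cycle was 1 block off
--     cycleLength = 4680
--
--     i = 1
--     while( i < cycle ):
--         i += 1
--         cycleStart = cycleStart + cycleLength
--
--     cycleEnd = cycleStart + cycleLength
--
--     return { 'start': cycleStart+1, 'end': cycleEnd }
-- ===== SOURCE B (Python) =====
-- def getCycleBlocks(cycle):
--     # closed form: cycle numbers below 1 clamp to the first cycle, as in the loop version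
--     first = 571747 - 1
--     length = 4680
--     start = first + length * max(cycle - 1, 0)
--     return {'start': start + 1, 'end': start + length}
-- ===== Notes on version B (the rewrite author's own statement) =====
-- stated objective: faster
-- what changed: Replaces the O(cycle) while-loop accumulation with a closed-form arithmetic formula start = base + length*max(cycle-1, 0).
import Mathlib
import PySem

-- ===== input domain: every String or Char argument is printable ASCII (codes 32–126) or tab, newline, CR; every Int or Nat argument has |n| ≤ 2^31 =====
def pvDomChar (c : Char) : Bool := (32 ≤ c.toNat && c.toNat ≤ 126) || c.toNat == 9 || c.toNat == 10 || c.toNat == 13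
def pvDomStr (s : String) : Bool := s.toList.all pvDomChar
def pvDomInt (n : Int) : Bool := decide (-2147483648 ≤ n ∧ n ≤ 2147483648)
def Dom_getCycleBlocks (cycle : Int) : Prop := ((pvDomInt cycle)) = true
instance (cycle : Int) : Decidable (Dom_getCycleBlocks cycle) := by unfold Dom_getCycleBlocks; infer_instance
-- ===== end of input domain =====

-- B replaces A's O(cycle) while-loop with a closed-form O(1) arithmetic formula; objective: faster.

-- ===== PORT A =====
-- while (i < cycle): i += 1; cycleStart += cycleLength
def getCycleBlocksLoop (i cycleStart cycle : Int) : Int :=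
  if i < cycle then getCycleBlocksLoop (i + 1) (cycleStart + 4680) cycle
  else cycleStart
termination_by (cycle - i).toNat
decreasing_by omega

def getCycleBlocks (cycle : Int) : List (String × Int) :=
  let cycleStart : Int := 571747 - 1
  let cycleLength : Int := 4680
  let cycleStart := getCycleBlocksLoop 1 cycleStart cycle
  let cycleEnd := cycleStart + cycleLength
  [("start", cycleStart + 1), ("end", cycleEnd)]

-- ===== PORT B =====
def getCycleBlocks_alt (cycle : Int) : List (String × Int) :=
  let first : Int := 571747 - 1
  let length : Int := 4680
  let start := first + length * max (cycle - 1) 0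
  [("start", start + 1), ("end", start + length)]

-- ===== PRECONDITION & SPEC =====
def Spec_getCycleBlocks (cycle : Int) (out : List (String × Int)) : Prop := out = getCycleBlocks_alt cycle
instance (cycle : Int) (out : List (String × Int)) : Decidable (Spec_getCycleBlocks cycle out) := by unfold Spec_getCycleBlocks; infer_instance

-- ===== CLAIM (what is proved, stated in full; the proofs are below) =====
def Claim_equal_getCycleBlocks : Prop := ∀ (cycle : Int), Dom_getCycleBlocks cycle → Spec_getCycleBlocks cycle (getCycleBlocks cycle)

-- ===== LEMMAS AND PROOFS =====
theorem getCycleBlocksLoop_closed (i cycleStart cycle : Int) :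
    getCycleBlocksLoop i cycleStart cycle = cycleStart + 4680 * max (cycle - i) 0 := by
  fun_induction getCycleBlocksLoop i cycleStart cycle with
  | case1 i cs h ih => rw [ih]; omega
  | case2 i cs h => omega

-- ===== VERDICT (by name: the statement is the Claim_ definition above) =====
theorem getCycleBlocks_spec : Claim_equal_getCycleBlocks := by
  intro cycle _
  unfold Spec_getCycleBlocks getCycleBlocks getCycleBlocks_alt
  simp only [getCycleBlocksLoop_closed]
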